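-- pv_equiv track=rewrite | github.com/ChristianJWhite/QR_Code | QR Code Detector/QRCodeDetection.py | bottomRightPix
-- ===== SOURCE A (Python) =====
-- def bottomRightPix(pixel_array, image_width, image_height):
--     pixel = []
--     iHeight = 0
--     jWidth = 0
--     for i in range(image_height):
--         for j in range(image_width):
--             if(pixel_array[i][j] > 0):
--                 if (j > jWidth):
--                     jWidth = j
--     for i in range(image_height):
--         for j in range(image_width):
--             if((pixel_array[i][j] > 0)and(pixel_array[i][jWidth-4] > 0)):
--                 if (i > iHeight):
--                     iHeight = i
--     pixel = [jWidth,iHeight]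
--     return pixel
-- ===== SOURCE B (Python) =====
-- def bottomRightPix(pixel_array, image_width, image_height):
--     jWidth = 0
--     pos_rows = []
--     for i in range(image_height):
--         for j in range(image_width - 1, -1, -1):
--             if pixel_array[i][j] > 0:
--                 pos_rows.append(i)
--                 if j > jWidth:
--                     jWidth = j
--                 break
--     iHeight = 0
--     for i in pos_rows:
--         if pixel_array[i][jWidth - 4] > 0:
--             iHeight = i
--     return [jWidth, iHeight]
-- ===== Notes on version B (the rewrite author's own statement) =====
-- stated objective: alternative
-- what changed: Single first pass scans each row right-to-left with an early break to find the max positive column and records which rows contain a positive pixel; the second phase then loops once over those recorded rows checking only column jWidth-4, instead of A's full nested rescan of the whole image.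
import Mathlib
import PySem

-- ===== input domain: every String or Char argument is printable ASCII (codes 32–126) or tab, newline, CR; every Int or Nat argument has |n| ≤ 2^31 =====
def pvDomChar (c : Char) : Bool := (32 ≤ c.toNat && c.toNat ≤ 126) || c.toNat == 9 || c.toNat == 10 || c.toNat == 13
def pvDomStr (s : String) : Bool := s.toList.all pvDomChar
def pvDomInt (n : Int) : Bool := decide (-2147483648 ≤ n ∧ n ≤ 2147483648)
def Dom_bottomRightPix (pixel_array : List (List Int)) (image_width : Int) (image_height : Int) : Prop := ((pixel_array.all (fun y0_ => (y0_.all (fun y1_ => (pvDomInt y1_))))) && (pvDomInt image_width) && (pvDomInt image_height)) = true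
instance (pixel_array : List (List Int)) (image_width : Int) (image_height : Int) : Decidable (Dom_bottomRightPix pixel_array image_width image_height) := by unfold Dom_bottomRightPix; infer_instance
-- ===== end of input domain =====

-- B replaces A's full nested second scan by one right-to-left row scan (with early break)
-- that records the rows containing a positive pixel, then a single loop over those rows.

-- ===== PORT A =====
def bottomRightPix (pixel_array : List (List Int)) (image_width : Int) (image_height : Int) : List Int :=
  let jWidth : Int :=
    (PySem.List.pyRange 0 image_height 1).foldl (fun jW i =>
      (PySem.List.pyRange 0 image_width 1).foldl (fun jW j =>
        if 0 < PySem.List.pyGetD (PySem.List.pyGetD pixel_array i []) j 0 then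
          (if jW < j then j else jW)
        else jW) jW) 0
  let iHeight : Int :=
    (PySem.List.pyRange 0 image_height 1).foldl (fun iH i =>
      (PySem.List.pyRange 0 image_width 1).foldl (fun iH j =>
        if 0 < PySem.List.pyGetD (PySem.List.pyGetD pixel_array i []) j 0 ∧
           0 < PySem.List.pyGetD (PySem.List.pyGetD pixel_array i []) (jWidth - 4) 0 then
          (if iH < i then i else iH)
        else iH) iH) 0
  [jWidth, iHeight]

-- ===== PORT B =====
-- first pass: reverse row scan with break  →  per-row find? (first positive column from the right)
def bottomRightPix_alt (pixel_array : List (List Int)) (image_width : Int) (image_height : Int) : List Int :=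
  let s : Int × List Int :=
    (PySem.List.pyRange 0 image_height 1).foldl (fun (st : Int × List Int) i =>
      match (PySem.List.pyRange (image_width - 1) (-1) (-1)).find?
          (fun j => decide (0 < PySem.List.pyGetD (PySem.List.pyGetD pixel_array i []) j 0)) with
      | some j => ((if st.1 < j then j else st.1), st.2 ++ [i])
      | none => st) (0, [])
  let iHeight : Int :=
    s.2.foldl (fun iH i =>
      if 0 < PySem.List.pyGetD (PySem.List.pyGetD pixel_array i []) (s.1 - 4) 0 then i else iH) 0
  [s.1, iHeight]

-- ===== PRECONDITION & SPEC =====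
-- Pre_ = exactly the inputs where Python A returns (no IndexError): rows touched by the loops
-- are long enough for the j-loop, and any row containing a positive pixel can be indexed at
-- jWidth-4 (stated without computing jWidth: some globally positive column j has 4 ≤ len+j);
-- quantifier bounds are clipped to the actual list lengths so the condition is evaluable.
def Pre_bottomRightPix (pixel_array : List (List Int)) (image_width : Int) (image_height : Int) : Prop :=
  (0 < image_width → image_height.toNat ≤ pixel_array.length) ∧
  ∀ i < min image_height.toNat pixel_array.length,
    (0 < image_width → image_width.toNat ≤ (pixel_array.getD i []).length) ∧
    ((∃ j < min image_width.toNat (pixel_array.getD i []).length,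
        0 < (pixel_array.getD i []).getD j 0) →
      ∃ i' < min image_height.toNat pixel_array.length,
        ∃ j < min image_width.toNat (pixel_array.getD i' []).length,
          4 ≤ (pixel_array.getD i []).length + j ∧ 0 < (pixel_array.getD i' []).getD j 0)
instance (pixel_array : List (List Int)) (image_width : Int) (image_height : Int) : Decidable (Pre_bottomRightPix pixel_array image_width image_height) := by unfold Pre_bottomRightPix; infer_instance

def pvWitness_bottomRightPix : List (List Int) × Int × Int := ([[1, 0, 0, 0, 1]], 5, 1)

def Spec_bottomRightPix (pixel_array : List (List Int)) (image_width : Int) (image_height : Int) (out : List Int) : Prop := out = bottomRightPix_alt pixel_array image_width image_height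
instance (pixel_array : List (List Int)) (image_width : Int) (image_height : Int) (out : List Int) : Decidable (Spec_bottomRightPix pixel_array image_width image_height out) := by unfold Spec_bottomRightPix; infer_instance

-- ===== CLAIM (what is proved, stated in full; the proofs are below) =====
def Claim_equal_bottomRightPix : Prop := ∀ (pixel_array : List (List Int)) (image_width : Int) (image_height : Int), Dom_bottomRightPix pixel_array image_width image_height → Pre_bottomRightPix pixel_array image_width image_height → Spec_bottomRightPix pixel_array image_width image_height (bottomRightPix pixel_array image_width image_height)

-- ===== LEMMAS AND PROOFS =====

theorem pv_if_max (a j : Int) : (if a < j then j else a) = max a j := by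
  rw [max_def]; split_ifs <;> omega

-- ascending-list running max = max with the rightmost element satisfying p
theorem pv_foldl_max_find (p : Int → Prop) [DecidablePred p] :
    ∀ (L : List Int), L.Pairwise (· ≤ ·) → ∀ acc : Int,
      L.foldl (fun a j => if p j then max a j else a) acc =
        (match L.reverse.find? (fun j => decide (p j)) with
         | some j => max acc j
         | none => acc) := by
  intro L
  induction L using List.reverseRecOn with
  | nil => intro _ acc; simp
  | append_singleton L x ih =>
    intro hp acc
    have hL : L.Pairwise (· ≤ ·) := (List.pairwise_append.mp hp).1
    have hbd : ∀ y ∈ L, y ≤ x := fun y hy => (List.pairwise_append.mp hp).2.2 y hy x (by simp)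
    rw [List.foldl_append]
    simp only [List.foldl_cons, List.foldl_nil, List.reverse_append, List.reverse_singleton,
      List.singleton_append, List.find?_cons]
    by_cases hx : p x
    · simp only [hx, decide_true, if_true]
      rw [ih hL acc]
      cases hfind : L.reverse.find? (fun j => decide (p j)) with
      | none => simp
      | some j =>
        have hj : j ∈ L := by
          have := List.mem_of_find?_eq_some hfind
          simpa using this
        have hle := hbd j hj
        simp [max_eq_right hle]
    · simp only [hx, decide_false]
      exact ih hL acc

-- unconditional-assignment loop = rightmost element satisfying c
theorem pv_foldl_assign_find (c : Int → Prop) [DecidablePred c] :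
    ∀ (L : List Int) (acc : Int),
      L.foldl (fun a i => if c i then i else a) acc =
        (match L.reverse.find? (fun i => decide (c i)) with
         | some i => i
         | none => acc) := by
  intro L
  induction L using List.reverseRecOn with
  | nil => intro acc; simp
  | append_singleton L x ih =>
    intro acc
    rw [List.foldl_append]
    simp only [List.foldl_cons, List.foldl_nil, List.reverse_append, List.reverse_singleton,
      List.singleton_append, List.find?_cons]
    by_cases hx : c x
    · simp [hx]
    · simp [hx, ih]

-- collapsing A's inner phase-2 loop: the update does not depend on j
theorem pv_foldl_const_and (p : Int → Prop) [DecidablePred p] (q : Prop) [Decidable q] (i : Int) :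
    ∀ (L : List Int) (acc : Int),
      L.foldl (fun a j => if p j ∧ q then max a i else a) acc =
        (if q ∧ L.any (fun j => decide (p j)) then max acc i else acc) := by
  intro L
  induction L with
  | nil => intro acc; simp
  | cons j L ih =>
    intro acc
    simp only [List.foldl_cons, List.any_cons, Bool.or_eq_true, decide_eq_true_eq]
    by_cases hj : p j
    · by_cases hq : q
      · rw [if_pos ⟨hj, hq⟩, ih (max acc i)]
        simp only [hq, hj, true_and, true_or, if_true]
        split_ifs <;> simp
      · rw [if_neg (by tauto), ih acc]
        simp [hq]
    · rw [if_neg (by tauto), ih acc]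
      simp [hj]

-- B's pair-state loop splits into the max fold and a filter
theorem pv_pairfold (f : Int → Option Int) :
    ∀ (L : List Int) (a : Int) (r : List Int),
      L.foldl (fun (st : Int × List Int) i =>
          match f i with
          | some j => (max st.1 j, st.2 ++ [i])
          | none => st) (a, r) =
        (L.foldl (fun x i => match f i with | some j => max x j | none => x) a,
         r ++ L.filter (fun i => (f i).isSome)) := by
  intro L
  induction L with
  | nil => intro a r; simp
  | cons i L ih =>
    intro a r
    simp only [List.foldl_cons, List.filter_cons]
    cases hf : f i with
    | none => simp [ih]
    | some j => simp [ih, List.append_assoc]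

theorem pv_find?_filter (p q : Int → Bool) :
    ∀ (l : List Int), (l.filter p).find? q = l.find? (fun i => p i && q i) := by
  intro l
  induction l with
  | nil => rfl
  | cons x l ih =>
    simp only [List.filter_cons, List.find?_cons]
    cases hp : p x <;> cases hq : q x <;> simp [hq, ih]

theorem pv_phase1 (G : Int → Int → Int) (w h : Int) :
    (PySem.List.pyRange 0 h 1).foldl (fun jW i =>
      (PySem.List.pyRange 0 w 1).foldl (fun jW j =>
        if 0 < G i j then max jW j else jW) jW) 0 =
    (PySem.List.pyRange 0 h 1).foldl (fun x i =>
      match (PySem.List.pyRange 0 w 1).reverse.find? (fun j => decide (0 < G i j)) with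
      | some j => max x j
      | none => x) 0 := by
  have hWp : (PySem.List.pyRange 0 w 1).Pairwise (· ≤ ·) :=
    (PySem.List.pairwise_lt_pyRange_one 0 w).imp fun hab => le_of_lt hab
  rw [show (fun (jW i : Int) => (PySem.List.pyRange 0 w 1).foldl (fun jW j =>
        if 0 < G i j then max jW j else jW) jW) =
      (fun (x i : Int) =>
        match (PySem.List.pyRange 0 w 1).reverse.find? (fun j => decide (0 < G i j)) with
        | some j => max x j
        | none => x) from funext fun a => funext fun i =>
          pv_foldl_max_find (fun j => 0 < G i j) _ hWp a]

theorem pv_phase2 (G : Int → Int → Int) (w h J : Int) :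
    (PySem.List.pyRange 0 h 1).foldl (fun iH i =>
      (PySem.List.pyRange 0 w 1).foldl (fun iH j =>
        if 0 < G i j ∧ 0 < G i (J - 4) then max iH i else iH) iH) 0 =
    ((PySem.List.pyRange 0 h 1).filter (fun i =>
        ((PySem.List.pyRange 0 w 1).reverse.find? (fun j => decide (0 < G i j))).isSome)).foldl
      (fun iH i => if 0 < G i (J - 4) then i else iH) 0 := by
  have hRp : (PySem.List.pyRange 0 h 1).Pairwise (· ≤ ·) :=
    (PySem.List.pairwise_lt_pyRange_one 0 h).imp fun hab => le_of_lt hab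
  -- collapse A's inner loop
  rw [show (fun (iH i : Int) => (PySem.List.pyRange 0 w 1).foldl (fun iH j =>
        if 0 < G i j ∧ 0 < G i (J - 4) then max iH i else iH) iH) =
      (fun (a i : Int) =>
        if 0 < G i (J - 4) ∧ (PySem.List.pyRange 0 w 1).any (fun j => decide (0 < G i j)) then
          max a i else a) from funext fun a => funext fun i =>
          pv_foldl_const_and (fun j => 0 < G i j) _ i _ a]
  rw [pv_foldl_max_find (fun i => 0 < G i (J - 4) ∧
    ((PySem.List.pyRange 0 w 1).any (fun j => decide (0 < G i j)) = true)) _ hRp 0]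
  -- B side: the filter predicate = any
  rw [show (fun i => ((PySem.List.pyRange 0 w 1).reverse.find? (fun j => decide (0 < G i j))).isSome) =
      (fun i => (PySem.List.pyRange 0 w 1).any (fun j => decide (0 < G i j))) from
      funext fun i => by
        rw [Bool.eq_iff_iff]
        simp [List.find?_isSome, List.any_eq_true]]
  rw [pv_foldl_assign_find (fun i => 0 < G i (J - 4)) _ 0]
  rw [← List.filter_reverse, pv_find?_filter]
  have hpred : (fun (i : Int) => (PySem.List.pyRange 0 w 1).any (fun j => decide (0 < G i j)) &&
      decide (0 < G i (J - 4))) =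
      (fun (i : Int) => decide (0 < G i (J - 4) ∧
        ((PySem.List.pyRange 0 w 1).any (fun j => decide (0 < G i j)) = true))) := by
    funext i
    simp [Bool.and_comm]
  rw [hpred]
  cases hfind : (PySem.List.pyRange 0 h 1).reverse.find? (fun i => decide (0 < G i (J - 4) ∧
      ((PySem.List.pyRange 0 w 1).any (fun j => decide (0 < G i j)) = true))) with
  | none => rfl
  | some i =>
    have hi : i ∈ PySem.List.pyRange 0 h 1 := by
      have := List.mem_of_find?_eq_some hfind
      simpa using this
    have h0 : 0 ≤ i := (PySem.List.mem_pyRange_one.mp hi).1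
    simp [max_eq_right h0]

theorem pv_ports_eq (pixel_array : List (List Int)) (image_width image_height : Int) :
    bottomRightPix pixel_array image_width image_height =
    bottomRightPix_alt pixel_array image_width image_height := by
  have hrev : PySem.List.pyRange (image_width - 1) (-1) (-1) =
      (PySem.List.pyRange 0 image_width 1).reverse := by
    have := PySem.List.pyRange_neg_one_eq_reverse (image_width - 1) (-1)
    norm_num at this
    exact this
  unfold bottomRightPix bottomRightPix_alt
  simp only [pv_if_max, hrev, pv_pairfold, List.nil_append]
  simp only [pv_phase1 (fun i j => PySem.List.pyGetD (PySem.List.pyGetD pixel_array i []) j 0)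
    image_width image_height]
  simp only [pv_phase2 (fun i j => PySem.List.pyGetD (PySem.List.pyGetD pixel_array i []) j 0)
    image_width image_height]

-- ===== VERDICT (by name: the statement is the Claim_ definition above) =====
theorem bottomRightPix_spec : Claim_equal_bottomRightPix := by
  intro pa w h _ _
  unfold Spec_bottomRightPix
  exact pv_ports_eq pa w h
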